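-- pv_equiv track=rewrite | github.com/a-eagle/MyTools | YBTX_Local/任务管理/任务查询.py | calcCommentWidth
-- ===== SOURCE A (Python) =====
-- def calcCommentWidth(row):
--     w = 0
--     for ch in row:
--         if ord(ch) < 255:
--             w += 8
--         else:
--             w += 14
--     return w
-- ===== SOURCE B (Python) =====
-- def calcCommentWidth(row):
--     if not row:
--         return 0
--     if len(row) == 1:
--         return 8 if ord(row) < 255 else 14
--     mid = len(row) // 2
--     return calcCommentWidth(row[:mid]) + calcCommentWidth(row[mid:])
-- ===== Notes on version B (the rewrite author's own statement) =====
-- stated objective: alternative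
-- what changed: Replaces the left-to-right branching accumulator loop with a divide-and-conquer recursion: split the string in half, compute each half's width recursively, and add; single characters are the base case (8 or 14). Correct because width is additive over concatenation.
import Mathlib
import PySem

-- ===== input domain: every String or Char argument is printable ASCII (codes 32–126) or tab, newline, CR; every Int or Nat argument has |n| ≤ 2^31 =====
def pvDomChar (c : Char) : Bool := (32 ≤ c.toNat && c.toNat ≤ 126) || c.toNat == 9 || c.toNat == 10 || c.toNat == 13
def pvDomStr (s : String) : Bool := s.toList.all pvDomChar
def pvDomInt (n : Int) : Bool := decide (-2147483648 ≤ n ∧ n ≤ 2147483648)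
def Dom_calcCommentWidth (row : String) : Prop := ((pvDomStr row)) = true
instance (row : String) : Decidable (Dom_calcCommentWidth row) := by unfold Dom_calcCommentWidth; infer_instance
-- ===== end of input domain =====

-- B replaces A's left-to-right accumulator loop with a divide-and-conquer recursion
-- (split in half, add the halves' widths); width is additive over concatenation.
-- ===== PORT A =====
def calcCommentWidth (row : String) : Int :=
  row.toList.foldl (fun w ch => if ch.toNat < 255 then w + 8 else w + 14) 0

-- ===== PORT B =====
-- row[:mid] / row[mid:] with 0 ≤ mid ≤ len are List.take / List.drop; the fuel
-- (initially the length, enough since the halves are strictly shorter) only makes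
-- the halving recursion structural — the 0-fuel branch is never reached.
def calcWidthGo : Nat → List Char → Int
  | _, [] => 0
  | _, [c] => if c.toNat < 255 then 8 else 14
  | 0, _ => 0
  | n + 1, l =>
      calcWidthGo n (l.take (l.length / 2)) + calcWidthGo n (l.drop (l.length / 2))

def calcCommentWidth_alt (row : String) : Int := calcWidthGo row.toList.length row.toList

-- ===== PRECONDITION & SPEC =====
def Spec_calcCommentWidth (row : String) (out : Int) : Prop := out = calcCommentWidth_alt row
instance (row : String) (out : Int) : Decidable (Spec_calcCommentWidth row out) := by unfold Spec_calcCommentWidth; infer_instance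

-- ===== CLAIM (what is proved, stated in full; the proofs are below) =====
def Claim_equal_calcCommentWidth : Prop := ∀ (row : String), Dom_calcCommentWidth row → Spec_calcCommentWidth row (calcCommentWidth row)

-- ===== LEMMAS AND PROOFS =====
theorem foldA_eq (l : List Char) (w : Int) :
    l.foldl (fun w ch => if ch.toNat < 255 then w + 8 else w + 14) w
      = w + 8 * (l.length : Int) + 6 * (l.countP (fun ch => 255 ≤ ch.toNat) : Int) := by
  induction l generalizing w with
  | nil => simp
  | cons c l ih =>
    simp only [List.foldl_cons, List.countP_cons, List.length_cons, ih]
    by_cases h : c.toNat < 255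
    · have : ¬ (255 ≤ c.toNat) := by omega
      simp [h, this]; ring
    · have : (255 ≤ c.toNat) := by omega
      simp [h, this]; ring

theorem calcWidthGo_eq : ∀ (n : Nat) (l : List Char), l.length ≤ n →
    calcWidthGo n l = 8 * (l.length : Int) + 6 * (l.countP (fun ch => 255 ≤ ch.toNat) : Int) := by
  intro n
  induction n with
  | zero =>
    intro l hl
    match l, hl with
    | [], _ => simp [calcWidthGo]
  | succ n ih =>
    intro l hl
    match l with
    | [] => simp [calcWidthGo]
    | [c] =>
      by_cases h : c.toNat < 255
      · have h' : ¬ (255 ≤ c.toNat) := by omega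
        simp [calcWidthGo, h, h']
      · have h' : (255 ≤ c.toNat) := by omega
        simp [calcWidthGo, h, h']
    | c1 :: c2 :: t =>
      have hlen : (c1 :: c2 :: t).length = t.length + 2 := by simp
      have h1 : ((c1 :: c2 :: t).take ((c1 :: c2 :: t).length / 2)).length ≤ n := by
        simp only [List.length_take]; simp at hl ⊢; omega
      have h2 : ((c1 :: c2 :: t).drop ((c1 :: c2 :: t).length / 2)).length ≤ n := by
        simp only [List.length_drop]; simp at hl ⊢; omega
      show calcWidthGo n _ + calcWidthGo n _ = _
      rw [ih _ h1, ih _ h2]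
      have hsplit := List.take_append_drop ((c1 :: c2 :: t).length / 2) (c1 :: c2 :: t)
      conv_rhs => rw [← hsplit]
      rw [List.countP_append, List.length_append]
      push_cast; ring

-- ===== VERDICT (by name: the statement is the Claim_ definition above) =====
theorem calcCommentWidth_spec : Claim_equal_calcCommentWidth := by
  intro row _
  unfold Spec_calcCommentWidth calcCommentWidth calcCommentWidth_alt
  rw [foldA_eq, calcWidthGo_eq _ _ (le_refl _)]; ring
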